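-- pv_equiv track=rewrite | github.com/cympyc1785/DynamicVerse | prompt_generation.py | find_continuous_segments
-- ===== SOURCE A (Python) =====
-- def find_continuous_segments(nums: list, segment_len=49, use_remaining_frames=False):
--     """
--     Returns:
--         segments_num  : list[(start_num, end_num_exclusive)]
--         segments_idx  : list[(start_idx, end_idx_exclusive)]
--
--     Usage:
--         data[start_idx:end_idx]
--     """
--     nums = sorted(nums)
--
--     segments_num = []
--     segments_idx = []
--
--     start_num = nums[0]
--     start_idx = 0
--
--     prev_num = nums[0]
--     length = 1
--
--     for i in range(1, len(nums)):
--         num = nums[i]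
--
--         if num == prev_num + 1:
--             length += 1
--         else:
--             start_num = num
--             start_idx = i
--             length = 1
--
--         if length == segment_len:
--             segments_num.append((start_num, num + 1))
--             segments_idx.append((start_idx, i + 1))
--
--             # reset for non-overlapping segments
--             start_num = num + 1
--             start_idx = i + 1
--             length = 0
--
--         prev_num = num
--
--     if use_remaining_frames and length < segment_len and length > 10:
--         segments_num.append((start_num, num + 1))
--         segments_idx.append((start_idx, i + 1))
--
--     return segments_num, segments_idx
-- ===== SOURCE B (Python) =====
-- def find_continuous_segments(nums: list, segment_len=49, use_remaining_frames=False):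
--     """Run-based re-implementation: build maximal consecutive runs once, then
--     chunk each run into non-overlapping pieces of segment_len."""
--     nums = sorted(nums)
--
--     # maximal consecutive runs, each as (start_value, start_index, length)
--     runs = []
--     cur = None
--     for i, v in enumerate(nums):
--         if cur is not None and v == cur[0] + cur[2]:
--             cur = (cur[0], cur[1], cur[2] + 1)
--         else:
--             if cur is not None:
--                 runs.append(cur)
--             cur = (v, i, 1)
--     if cur is not None:
--         runs.append(cur)
--
--     segments_num = []
--     segments_idx = []
--     for v, s, L in runs:
--         k = L // segment_len if segment_len > 0 else 0
--         for j in range(k):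
--             segments_num.append((v + j * segment_len, v + (j + 1) * segment_len))
--             segments_idx.append((s + j * segment_len, s + (j + 1) * segment_len))
--
--     if use_remaining_frames and segment_len > 0 and runs:
--         v, s, L = runs[-1]
--         r = L % segment_len
--         if r > 10:
--             segments_num.append((v + L - r, v + L))
--             segments_idx.append((s + L - r, s + L))
--
--     return segments_num, segments_idx
-- ===== Notes on version B (the rewrite author's own statement) =====
-- stated objective: alternative
-- what changed: B replaces A's single stateful scan (start/length/reset bookkeeping) by a two-phase decomposition: build the maximal consecutive runs once, then chunk each run into segment_len pieces by arithmetic and take the last run's remainder by modulus.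
-- intended difference: When segment_len == 1 (and nums is non-empty), A never emits any segment from the first consecutive run because its length check only runs from index 1, returning only the later runs' elements; B returns every element as a unit segment, which is the intended chunking. — e.g. on find_continuous_segments([5, 6, 9], 1, false): A returns (([(9, 10)]), ([(2, 3)])), B returns (([(5, 6), (6, 7), (9, 10)]), ([(0, 1), (1, 2), (2, 3)]))
import Mathlib
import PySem

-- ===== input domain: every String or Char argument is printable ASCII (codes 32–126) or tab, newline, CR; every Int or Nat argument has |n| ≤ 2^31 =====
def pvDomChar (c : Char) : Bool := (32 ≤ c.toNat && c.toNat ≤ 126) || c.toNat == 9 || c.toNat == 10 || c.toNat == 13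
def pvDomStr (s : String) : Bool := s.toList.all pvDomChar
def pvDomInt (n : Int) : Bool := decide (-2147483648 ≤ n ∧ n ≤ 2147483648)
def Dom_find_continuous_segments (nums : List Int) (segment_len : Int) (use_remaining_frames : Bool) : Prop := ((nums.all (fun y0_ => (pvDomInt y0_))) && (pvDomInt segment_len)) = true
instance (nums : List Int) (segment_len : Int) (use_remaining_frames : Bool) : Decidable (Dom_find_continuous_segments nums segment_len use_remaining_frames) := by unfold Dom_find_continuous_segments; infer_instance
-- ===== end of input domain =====

-- B re-decomposes A's stateful scan into: build maximal consecutive runs, then chunk each run arithmetically (objective: alternative).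

-- ===== PORT A =====
-- the for-loop of A: state (segs_num, segs_idx, start_num, start_idx, prev_num, length), index i;
-- returns the final state together with the final value of i+1 (Python's final i is that minus 1)
def pvA_loop (segment_len : Int) :
    List Int → Int → List (Int × Int) → List (Int × Int) → Int → Int → Int → Int →
    (List (Int × Int)) × (List (Int × Int)) × Int × Int × Int × Int × Int
  | [], i, sn, si, startN, startI, prevN, length => (sn, si, startN, startI, prevN, length, i)
  | num :: rest, i, sn, si, startN, startI, prevN, length =>
    let st : Int × Int × Int :=
      if num = prevN + 1 then (startN, startI, length + 1) else (num, i, 1)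
    if st.2.2 = segment_len then
      pvA_loop segment_len rest (i + 1) (sn ++ [(st.1, num + 1)]) (si ++ [(st.2.1, i + 1)])
        (num + 1) (i + 1) num 0
    else
      pvA_loop segment_len rest (i + 1) sn si st.1 st.2.1 num st.2.2

-- A's final `if use_remaining_frames and length < segment_len and length > 10` block
def pvA_finish (segment_len : Int) (use_remaining_frames : Bool)
    (t : (List (Int × Int)) × (List (Int × Int)) × Int × Int × Int × Int × Int) :
    (List (Int × Int)) × (List (Int × Int)) :=
  if use_remaining_frames ∧ t.2.2.2.2.2.1 < segment_len ∧ t.2.2.2.2.2.1 > 10 then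
    (t.1 ++ [(t.2.2.1, t.2.2.2.2.1 + 1)], t.2.1 ++ [(t.2.2.2.1, t.2.2.2.2.2.2)])
  else (t.1, t.2.1)

def find_continuous_segments (nums : List Int) (segment_len : Int) (use_remaining_frames : Bool) : (List (Int × Int)) × (List (Int × Int)) :=
  match PySem.List.sorted nums id false with
  | [] => ([], [])  -- Python raises IndexError on nums[0]; excluded by Pre_
  | n0 :: rest =>
    pvA_finish segment_len use_remaining_frames
      (pvA_loop segment_len rest 1 [] [] n0 0 n0 1)

-- ===== PORT B =====
-- B's first loop: build maximal consecutive runs (start_value, start_index, length)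
def pvB_runs : List Int → Int → Option (Int × Int × Int) → List (Int × Int × Int) → List (Int × Int × Int)
  | [], _, cur, runs =>
    match cur with
    | none => runs
    | some c => runs ++ [c]
  | v :: rest, i, cur, runs =>
    match cur with
    | some (cv, cs, cl) =>
      if v = cv + cl then pvB_runs rest (i + 1) (some (cv, cs, cl + 1)) runs
      else pvB_runs rest (i + 1) (some (v, i, 1)) (runs ++ [(cv, cs, cl)])
    | none => pvB_runs rest (i + 1) (some (v, i, 1)) runs

-- B's chunking of one run: the k = L // segment_len complete chunks
def pvB_chunks (segment_len : Int) (r : Int × Int × Int) :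
    (List (Int × Int)) × (List (Int × Int)) :=
  let k := if 0 < segment_len then PySem.Int.floordiv r.2.2 segment_len else 0
  ((PySem.List.pyRange 0 k 1).map (fun j => (r.1 + j * segment_len, r.1 + (j + 1) * segment_len)),
   (PySem.List.pyRange 0 k 1).map (fun j => (r.2.1 + j * segment_len, r.2.1 + (j + 1) * segment_len)))

def pvB_emit (segment_len : Int) (runs : List (Int × Int × Int)) :
    (List (Int × Int)) × (List (Int × Int)) :=
  runs.foldl (fun acc r => (acc.1 ++ (pvB_chunks segment_len r).1, acc.2 ++ (pvB_chunks segment_len r).2)) ([], [])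

def find_continuous_segments_alt (nums : List Int) (segment_len : Int) (use_remaining_frames : Bool) : (List (Int × Int)) × (List (Int × Int)) :=
  let runs := pvB_runs (PySem.List.sorted nums id false) 0 none []
  let e := pvB_emit segment_len runs
  if use_remaining_frames ∧ 0 < segment_len then
    match runs.getLast? with
    | some (v, s, L) =>
      let r := PySem.Int.mod L segment_len
      if r > 10 then (e.1 ++ [(v + L - r, v + L)], e.2 ++ [(s + L - r, s + L)]) else e
    | none => e
  else e

-- ===== PRECONDITION & SPEC =====
-- Pre_ excludes only the empty list, on which Python A raises IndexError at nums[0].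
def Pre_find_continuous_segments (nums : List Int) (segment_len : Int) (use_remaining_frames : Bool) : Prop := nums ≠ []
instance (nums : List Int) (segment_len : Int) (use_remaining_frames : Bool) : Decidable (Pre_find_continuous_segments nums segment_len use_remaining_frames) := by unfold Pre_find_continuous_segments; infer_instance
def pvWitness_find_continuous_segments : List Int × Int × Bool := ([3, 1, 2, 7], 2, true)

-- When segment_len == 1 (nums non-empty), A never emits a segment from the first consecutive run
-- (its length check only runs from index 1), while B returns every element as a unit segment, the intended chunking.
def D_find_continuous_segments (nums : List Int) (segment_len : Int) (use_remaining_frames : Bool) : Prop := segment_len = 1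
instance (nums : List Int) (segment_len : Int) (use_remaining_frames : Bool) : Decidable (D_find_continuous_segments nums segment_len use_remaining_frames) := by unfold D_find_continuous_segments; infer_instance

def Spec_find_continuous_segments (nums : List Int) (segment_len : Int) (use_remaining_frames : Bool) (out : (List (Int × Int)) × (List (Int × Int))) : Prop := ¬ D_find_continuous_segments nums segment_len use_remaining_frames → out = find_continuous_segments_alt nums segment_len use_remaining_frames
instance (nums : List Int) (segment_len : Int) (use_remaining_frames : Bool) (out : (List (Int × Int)) × (List (Int × Int))) : Decidable (Spec_find_continuous_segments nums segment_len use_remaining_frames out) := by unfold Spec_find_continuous_segments; infer_instance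

def pvDiffWitness_find_continuous_segments : List Int × Int × Bool := ([5, 6, 9], 1, false)
def pvDiffWitnessOut_find_continuous_segments : ((List (Int × Int)) × (List (Int × Int))) × ((List (Int × Int)) × (List (Int × Int))) :=
  ((([(9, 10)]), ([(2, 3)])), (([(5, 6), (6, 7), (9, 10)]), ([(0, 1), (1, 2), (2, 3)])))

-- ===== CLAIM (what is proved, stated in full; the proofs are below) =====
def Claim_unchanged_find_continuous_segments : Prop := ∀ (nums : List Int) (segment_len : Int) (use_remaining_frames : Bool), Dom_find_continuous_segments nums segment_len use_remaining_frames → Pre_find_continuous_segments nums segment_len use_remaining_frames → Spec_find_continuous_segments nums segment_len use_remaining_frames (find_continuous_segments nums segment_len use_remaining_frames)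
def Claim_changed_find_continuous_segments : Prop := Dom_find_continuous_segments (pvDiffWitness_find_continuous_segments.1) (pvDiffWitness_find_continuous_segments.2.1) (pvDiffWitness_find_continuous_segments.2.2) ∧ Pre_find_continuous_segments (pvDiffWitness_find_continuous_segments.1) (pvDiffWitness_find_continuous_segments.2.1) (pvDiffWitness_find_continuous_segments.2.2) ∧ D_find_continuous_segments (pvDiffWitness_find_continuous_segments.1) (pvDiffWitness_find_continuous_segments.2.1) (pvDiffWitness_find_continuous_segments.2.2) ∧ find_continuous_segments (pvDiffWitness_find_continuous_segments.1) (pvDiffWitness_find_continuous_segments.2.1) (pvDiffWitness_find_continuous_segments.2.2) = pvDiffWitnessOut_find_continuous_segments.1 ∧ find_continuous_segments_alt (pvDiffWitness_find_continuous_segments.1) (pvDiffWitness_find_continuous_segments.2.1) (pvDiffWitness_find_continuous_segments.2.2) = pvDiffWitnessOut_find_continuous_segments.2 ∧ pvDiffWitnessOut_find_continuous_segments.1 ≠ pvDiffWitnessOut_find_continuous_segments.2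
def Claim_exact_find_continuous_segments : Prop := ∀ (nums : List Int) (segment_len : Int) (use_remaining_frames : Bool), Dom_find_continuous_segments nums segment_len use_remaining_frames → Pre_find_continuous_segments nums segment_len use_remaining_frames → D_find_continuous_segments nums segment_len use_remaining_frames → find_continuous_segments nums segment_len use_remaining_frames ≠ find_continuous_segments_alt nums segment_len use_remaining_frames

-- ===== LEMMAS AND PROOFS =====

-- proof-side specification of B's output: chunks of the head run starting at chunk index k0,
-- full chunks of the later runs, and the last run's >10 remainder (stated with Int ediv/emod)
def pvG (seg : Int) (ur : Bool) : Int → List (Int × Int × Int) → (List (Int × Int)) × (List (Int × Int))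
  | _, [] => ([], [])
  | k0, [(v, s, L)] =>
    let cn := (PySem.List.pyRange k0 (L / seg) 1).map fun j => (v + j * seg, v + (j + 1) * seg)
    let ci := (PySem.List.pyRange k0 (L / seg) 1).map fun j => (s + j * seg, s + (j + 1) * seg)
    if ur = true ∧ L % seg > 10 then
      (cn ++ [(v + L - L % seg, v + L)], ci ++ [(s + L - L % seg, s + L)])
    else (cn, ci)
  | k0, (v, s, L) :: r2 :: rs =>
    let cn := (PySem.List.pyRange k0 (L / seg) 1).map fun j => (v + j * seg, v + (j + 1) * seg)
    let ci := (PySem.List.pyRange k0 (L / seg) 1).map fun j => (s + j * seg, s + (j + 1) * seg)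
    let t := pvG seg ur 0 (r2 :: rs)
    (cn ++ t.1, ci ++ t.2)

-- the tail of find_continuous_segments_alt, as a function of the runs list
def pvB_out (seg : Int) (ur : Bool) (runs : List (Int × Int × Int)) : (List (Int × Int)) × (List (Int × Int)) :=
  let e := pvB_emit seg runs
  if ur ∧ 0 < seg then
    match runs.getLast? with
    | some (v, s, L) =>
      let r := PySem.Int.mod L seg
      if r > 10 then (e.1 ++ [(v + L - r, v + L)], e.2 ++ [(s + L - r, s + L)]) else e
    | none => e
  else e

theorem alt_eq_pvB_out (nums : List Int) (seg : Int) (ur : Bool) :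
    find_continuous_segments_alt nums seg ur
      = pvB_out seg ur (pvB_runs (PySem.List.sorted nums id false) 0 none []) := rfl

theorem pvB_runs_acc (rest : List Int) : ∀ (i : Int) (cur : Option (Int × Int × Int))
    (acc : List (Int × Int × Int)),
    pvB_runs rest i cur acc = acc ++ pvB_runs rest i cur [] := by
  induction rest with
  | nil => intro i cur acc; cases cur <;> simp [pvB_runs]
  | cons v rest ih =>
    intro i cur acc
    cases cur with
    | none => simp only [pvB_runs]; rw [ih, ih (i + 1) _ []]
    | some c =>
      obtain ⟨cv, cs, cl⟩ := c
      simp only [pvB_runs]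
      by_cases h : v = cv + cl
      · rw [if_pos h, if_pos h, ih, ih (i + 1) _ []]
      · rw [if_neg h, if_neg h, ih, ih (i + 1) (some (v, i, 1)) ([] ++ [(cv, cs, cl)])]
        simp

theorem pvB_runs_head (rest : List Int) : ∀ (i v s L : Int),
    ∃ L' rs, pvB_runs rest i (some (v, s, L)) [] = (v, s, L') :: rs ∧ L ≤ L' := by
  induction rest with
  | nil => intro i v s L; exact ⟨L, [], by simp [pvB_runs], le_refl L⟩
  | cons num rest ih =>
    intro i v s L
    by_cases h : num = v + L
    · obtain ⟨L', rs, hr, hle⟩ := ih (i + 1) v s (L + 1)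
      exact ⟨L', rs, by simp only [pvB_runs, if_pos h]; exact hr, by omega⟩
    · refine ⟨L, pvB_runs rest (i + 1) (some (num, i, 1)) [], ?_, le_refl L⟩
      simp only [pvB_runs, if_neg h]
      rw [pvB_runs_acc]; simp

theorem pvB_emit_cons (seg : Int) (r : Int × Int × Int) (rs : List (Int × Int × Int)) :
    pvB_emit seg (r :: rs)
      = ((pvB_chunks seg r).1 ++ (pvB_emit seg rs).1, (pvB_chunks seg r).2 ++ (pvB_emit seg rs).2) := by
  have acc : ∀ (l : List (Int × Int × Int)) (a b : List (Int × Int)),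
      l.foldl (fun acc r => (acc.1 ++ (pvB_chunks seg r).1, acc.2 ++ (pvB_chunks seg r).2)) (a, b)
        = (a ++ (pvB_emit seg l).1, b ++ (pvB_emit seg l).2) := by
    intro l
    induction l with
    | nil => intro a b; simp [pvB_emit]
    | cons x xs ih =>
      intro a b
      simp only [pvB_emit, List.foldl_cons]
      rw [ih, ih ([] ++ (pvB_chunks seg x).1) ([] ++ (pvB_chunks seg x).2)]
      simp
  simp only [pvB_emit, List.foldl_cons]
  rw [acc]
  simp [pvB_emit]

theorem pvB_out_eq_pvG (seg : Int) (ur : Bool) (hseg : 0 < seg) :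
    ∀ runs : List (Int × Int × Int), pvB_out seg ur runs = pvG seg ur 0 runs := by
  intro runs
  induction runs with
  | nil => simp [pvB_out, pvB_emit, pvG]
  | cons r rs ih =>
    obtain ⟨v, s, L⟩ := r
    cases rs with
    | nil =>
      simp only [pvB_out, List.getLast?_singleton, pvG, pvB_emit, List.foldl_cons, List.foldl_nil,
        pvB_chunks, PySem.Int.floordiv_eq_ediv_of_pos hseg,
        PySem.Int.mod_eq_emod_of_pos hseg, hseg, and_true]
      by_cases hur : ur <;> by_cases hmd : L % seg > 10 <;> simp [hur, hmd]
    | cons r2 rs2 =>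
      have hg : ((v, s, L) :: r2 :: rs2).getLast? = (r2 :: rs2).getLast? := by
        simp [List.getLast?_cons_cons]
      simp only [pvB_out, hg, pvB_emit_cons] at ih ⊢
      simp only [pvG]
      rw [← ih]
      simp only [pvB_chunks, if_pos hseg, PySem.Int.floordiv_eq_ediv_of_pos hseg]
      cases hL : (r2 :: rs2).getLast? with
      | none => simp at hL
      | some c =>
        obtain ⟨lv, ls, lL⟩ := c
        by_cases hur : ur <;> by_cases hr10 : 10 < lL % seg <;>
          simp [hur, hr10, hseg, List.append_assoc]

-- arithmetic: division and modulus of L+1 by seg, in the two stepping cases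
theorem pv_step_full (seg L : Int) (hseg : 0 < seg) (h : L % seg + 1 = seg) :
    (L + 1) % seg = 0 ∧ (L + 1) / seg = L / seg + 1 := by
  have hd := Int.mul_ediv_add_emod L seg
  have h2 := (Int.ediv_emod_unique (a := L + 1) (b := seg) (r := (0:Int)) (q := L / seg + 1) hseg).mpr
    ⟨by rw [mul_add, mul_one]; omega, le_refl 0, hseg⟩
  exact ⟨h2.2, h2.1⟩

theorem pv_step_part (seg L : Int) (hseg : 0 < seg) (h : L % seg + 1 < seg) :
    (L + 1) % seg = L % seg + 1 ∧ (L + 1) / seg = L / seg := by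
  have hd := Int.mul_ediv_add_emod L seg
  have h0 : 0 ≤ L % seg := Int.emod_nonneg L (by omega)
  have h2 := (Int.ediv_emod_unique (a := L + 1) (b := seg) (r := L % seg + 1) (q := L / seg) hseg).mpr
    ⟨by omega, by omega, h⟩
  exact ⟨h2.2, h2.1⟩

theorem pv_mod_lt (seg L : Int) (hseg : 0 < seg) : L % seg < seg ∧ 0 ≤ L % seg :=
  ⟨Int.emod_lt_of_pos L hseg, Int.emod_nonneg L (by omega)⟩

-- peel one chunk off the head run of pvG
theorem pvG_peel (seg : Int) (ur : Bool) (k0 v s Lf : Int) (rs : List (Int × Int × Int))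
    (h : k0 < Lf / seg) :
    pvG seg ur k0 ((v, s, Lf) :: rs)
      = ((v + k0 * seg, v + (k0 + 1) * seg) :: (pvG seg ur (k0 + 1) ((v, s, Lf) :: rs)).1,
         (s + k0 * seg, s + (k0 + 1) * seg) :: (pvG seg ur (k0 + 1) ((v, s, Lf) :: rs)).2) := by
  cases rs with
  | nil =>
    simp only [pvG]
    rw [PySem.List.pyRange_one_cons h]
    by_cases hc : ur = true ∧ Lf % seg > 10 <;> simp [hc]
  | cons r2 rs2 =>
    simp only [pvG]
    rw [PySem.List.pyRange_one_cons h]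
    simp

-- the main invariant: A's loop state corresponds to the leftover of the current run
theorem pvA_inv (seg : Int) (ur : Bool) (hseg : 2 ≤ seg) (rest : List Int) :
    ∀ (v s L : Int) (sn si : List (Int × Int)), 1 ≤ L →
    pvA_finish seg ur (pvA_loop seg rest (s + L) sn si
        (v + L - L % seg) (s + L - L % seg) (v + L - 1) (L % seg))
      = (sn ++ (pvG seg ur (L / seg) (pvB_runs rest (s + L) (some (v, s, L)) [])).1,
         si ++ (pvG seg ur (L / seg) (pvB_runs rest (s + L) (some (v, s, L)) [])).2) := by
  induction rest with
  | nil =>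
    intro v s L sn si hL
    obtain ⟨hlt, hnn⟩ := pv_mod_lt seg L (by omega)
    simp only [pvA_loop, pvB_runs, List.nil_append, pvG, pvA_finish]
    rw [PySem.List.pyRange_one_eq_nil (le_refl (L / seg))]
    by_cases hur : ur <;> by_cases h10 : L % seg > 10 <;>
      simp [hur, h10, hlt]
  | cons num rest ih =>
    intro v s L sn si hL
    obtain ⟨hlt, hnn⟩ := pv_mod_lt seg L (by omega)
    by_cases hnum : num = v + L
    · -- extends the current run
      have hcond : num = (v + L - 1) + 1 := by omega
      by_cases hfull : L % seg + 1 = seg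
      · -- chunk completed: A emits, length resets to 0
        obtain ⟨hm, hd⟩ := pv_step_full seg L (by omega) hfull
        have e1 : pvA_loop seg (num :: rest) (s + L) sn si
            (v + L - L % seg) (s + L - L % seg) (v + L - 1) (L % seg)
            = pvA_loop seg rest (s + L + 1)
                (sn ++ [(v + L - L % seg, num + 1)]) (si ++ [(s + L - L % seg, s + L + 1)])
                (num + 1) (s + L + 1) num 0 := by
          simp only [pvA_loop, if_pos hcond]
          rw [if_pos hfull]
        have e2 : pvB_runs (num :: rest) (s + L) (some (v, s, L)) []
            = pvB_runs rest (s + L + 1) (some (v, s, L + 1)) [] := by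
          simp only [pvB_runs, if_pos hnum]
        have ih' := ih v s (L + 1) (sn ++ [(v + L - L % seg, num + 1)])
          (si ++ [(s + L - L % seg, s + L + 1)]) (by omega)
        rw [hm] at ih'
        have harg1 : v + (L + 1) - 0 = num + 1 := by omega
        have harg2 : s + (L + 1) - 0 = s + L + 1 := by omega
        have harg3 : v + (L + 1) - 1 = num := by omega
        have harg4 : s + (L + 1) = s + L + 1 := by omega
        rw [harg1, harg2, harg3, harg4, hd] at ih'
        rw [e1, ih', e2]
        -- peel chunk k0 = L / seg off the head run
        obtain ⟨Lf, rs, hruns, hle⟩ := pvB_runs_head rest (s + L + 1) v s (L + 1)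
        rw [hruns]
        have hk : L / seg < Lf / seg := by
          have := Int.ediv_le_ediv (by omega : (0:Int) < seg) hle
          omega
        rw [pvG_peel seg ur (L / seg) v s Lf rs hk]
        have hx : v + (L / seg) * seg = v + L - L % seg := by
          have := Int.mul_ediv_add_emod L seg
          rw [mul_comm]; omega
        have hy : v + (L / seg + 1) * seg = num + 1 := by
          have := Int.mul_ediv_add_emod L seg
          rw [add_mul, one_mul, mul_comm]; omega
        have hx2 : s + (L / seg) * seg = s + L - L % seg := by
          have := Int.mul_ediv_add_emod L seg
          rw [mul_comm]; omega
        have hy2 : s + (L / seg + 1) * seg = s + L + 1 := by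
          have := Int.mul_ediv_add_emod L seg
          rw [add_mul, one_mul, mul_comm]; omega
        rw [hx, hy, hx2, hy2]
        simp
      · -- chunk not completed: length grows to L % seg + 1
        obtain ⟨hm, hd⟩ := pv_step_part seg L (by omega) (by omega)
        have e1 : pvA_loop seg (num :: rest) (s + L) sn si
            (v + L - L % seg) (s + L - L % seg) (v + L - 1) (L % seg)
            = pvA_loop seg rest (s + L + 1) sn si
                (v + L - L % seg) (s + L - L % seg) num (L % seg + 1) := by
          simp only [pvA_loop, if_pos hcond]
          rw [if_neg (by omega : ¬ (L % seg + 1 = seg))]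
        have e2 : pvB_runs (num :: rest) (s + L) (some (v, s, L)) []
            = pvB_runs rest (s + L + 1) (some (v, s, L + 1)) [] := by
          simp only [pvB_runs, if_pos hnum]
        have ih' := ih v s (L + 1) sn si (by omega)
        rw [hm, hd] at ih'
        have harg1 : v + (L + 1) - (L % seg + 1) = v + L - L % seg := by omega
        have harg2 : s + (L + 1) - (L % seg + 1) = s + L - L % seg := by omega
        have harg3 : v + (L + 1) - 1 = num := by omega
        have harg4 : s + (L + 1) = s + L + 1 := by omega
        rw [harg1, harg2, harg3, harg4] at ih'
        rw [e1, ih', e2]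
    · -- a new run starts at num
      have hcond : ¬ (num = (v + L - 1) + 1) := by omega
      have e1 : pvA_loop seg (num :: rest) (s + L) sn si
          (v + L - L % seg) (s + L - L % seg) (v + L - 1) (L % seg)
          = pvA_loop seg rest (s + L + 1) sn si num (s + L) num 1 := by
        simp only [pvA_loop, if_neg hcond]
        rw [if_neg (by omega : ¬ (1:Int) = seg)]
      have e2 : pvB_runs (num :: rest) (s + L) (some (v, s, L)) []
          = [(v, s, L)] ++ pvB_runs rest (s + L + 1) (some (num, s + L, 1)) [] := by
        simp only [pvB_runs, if_neg hnum]
        rw [pvB_runs_acc]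
        simp
      have hm1 : (1 : Int) % seg = 1 := Int.emod_eq_of_lt (by omega) (by omega)
      have hd1 : (1 : Int) / seg = 0 := Int.ediv_eq_zero_of_lt (by omega) (by omega)
      have ih' := ih num (s + L) 1 sn si (le_refl 1)
      rw [hm1, hd1] at ih'
      have harg1 : num + 1 - 1 = num := by omega
      have harg2 : s + L + 1 - 1 = s + L := by omega
      rw [harg1, harg2] at ih'
      rw [e1, ih', e2]
      obtain ⟨Lf, rs, hruns, _⟩ := pvB_runs_head rest (s + L + 1) num (s + L) 1
      rw [hruns]
      simp only [List.singleton_append, pvG]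
      rw [PySem.List.pyRange_one_eq_nil (le_refl (L / seg))]
      simp

-- segment_len ≤ 0: A's loop appends nothing and its length stays ≥ 1
theorem pvA_loop_nonpos (seg : Int) (hseg : seg ≤ 0) (rest : List Int) :
    ∀ (i : Int) (sn si : List (Int × Int)) (a b p len : Int), 1 ≤ len →
    (pvA_loop seg rest i sn si a b p len).1 = sn ∧
    (pvA_loop seg rest i sn si a b p len).2.1 = si ∧
    1 ≤ (pvA_loop seg rest i sn si a b p len).2.2.2.2.2.1 := by
  induction rest with
  | nil => intro i sn si a b p len hlen; simp [pvA_loop]; omega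
  | cons num rest ih =>
    intro i sn si a b p len hlen
    simp only [pvA_loop]
    by_cases h : num = p + 1
    · rw [if_pos h]
      rw [if_neg (by simp; omega : ¬ ((a, b, len + 1) : Int × Int × Int).2.2 = seg)]
      exact ih (i + 1) sn si a b num (len + 1) (by omega)
    · rw [if_neg h]
      rw [if_neg (by simp; omega : ¬ ((num, i, 1) : Int × Int × Int).2.2 = seg)]
      exact ih (i + 1) sn si num i num 1 (le_refl 1)

theorem pvB_emit_nonpos (seg : Int) (hseg : seg ≤ 0) (runs : List (Int × Int × Int)) :
    pvB_emit seg runs = ([], []) := by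
  induction runs with
  | nil => rfl
  | cons r rs ih =>
    rw [pvB_emit_cons, ih]
    simp [pvB_chunks, if_neg (by omega : ¬ (0 < seg)), PySem.List.pyRange_one_eq_nil (le_refl 0)]

-- ===== VERDICT (by name: the statement is the Claim_ definition above) =====
theorem find_continuous_segments_spec : Claim_unchanged_find_continuous_segments := by
  intro nums seg ur _ _ hnd
  have hne : seg ≠ 1 := by
    intro h; exact hnd (by simp [D_find_continuous_segments, h])
  rw [alt_eq_pvB_out]
  unfold find_continuous_segments
  by_cases hs : seg < 1
  · -- seg ≤ 0: both sides return ([], [])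
    have hB : pvB_out seg ur (pvB_runs (PySem.List.sorted nums id false) 0 none []) = ([], []) := by
      simp [pvB_out, pvB_emit_nonpos seg (by omega)]
      intro h; omega
    rw [hB]
    cases PySem.List.sorted nums id false with
    | nil => rfl
    | cons n0 rest =>
      show pvA_finish seg ur (pvA_loop seg rest 1 [] [] n0 0 n0 1) = ([], [])
      obtain ⟨h1, h2, h3⟩ := pvA_loop_nonpos seg (by omega) rest 1 [] [] n0 0 n0 1 (le_refl 1)
      simp only [pvA_finish]
      rw [if_neg (by omega : ¬ (ur = true ∧ (pvA_loop seg rest 1 [] [] n0 0 n0 1).2.2.2.2.2.1 < seg ∧ (pvA_loop seg rest 1 [] [] n0 0 n0 1).2.2.2.2.2.1 > 10))]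
      rw [h1, h2]
  · -- seg ≥ 2
    have hseg2 : 2 ≤ seg := by omega
    rw [pvB_out_eq_pvG seg ur (by omega)]
    cases PySem.List.sorted nums id false with
    | nil =>
      show ([], []) = pvG seg ur 0 (pvB_runs [] 0 none [])
      simp [pvB_runs, pvG]
    | cons n0 rest =>
      show pvA_finish seg ur (pvA_loop seg rest 1 [] [] n0 0 n0 1)
        = pvG seg ur 0 (pvB_runs (n0 :: rest) 0 none [])
      have hm1 : (1 : Int) % seg = 1 := Int.emod_eq_of_lt (by omega) (by omega)
      have hd1 : (1 : Int) / seg = 0 := Int.ediv_eq_zero_of_lt (by omega) (by omega)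
      have inv := pvA_inv seg ur hseg2 rest n0 0 1 [] [] (le_refl 1)
      rw [hm1, hd1] at inv
      have harg1 : n0 + 1 - 1 = n0 := by omega
      have harg2 : (0 : Int) + 1 - 1 = 0 := by omega
      have harg3 : (0 : Int) + 1 = 1 := by omega
      rw [harg1, harg2, harg3] at inv
      rw [inv]
      have e : pvB_runs (n0 :: rest) 0 none [] = pvB_runs rest 1 (some (n0, 0, 1)) [] := by
        simp [pvB_runs]
      rw [e]
      simp
theorem find_continuous_segments_changed : Claim_changed_find_continuous_segments := by
  unfold Claim_changed_find_continuous_segments; decide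

-- with segment_len = 1 every index pair A ever emits starts at an index ≥ 1
theorem pvA_idx_ge_one (rest : List Int) : ∀ (i : Int) (sn si : List (Int × Int)) (sN sI pN len : Int),
    1 ≤ i → 0 ≤ len → (len = 0 → 1 ≤ sI) → (∀ p ∈ si, 1 ≤ p.1) →
    ∀ p ∈ (pvA_loop 1 rest i sn si sN sI pN len).2.1, 1 ≤ p.1 := by
  induction rest with
  | nil =>
    intro i sn si sN sI pN len hi hnn h0 hsi p hp
    exact hsi p (by simpa [pvA_loop] using hp)
  | cons num rest ih =>
    intro i sn si sN sI pN len hi hnn h0 hsi p hp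
    simp only [pvA_loop] at hp
    by_cases h : num = pN + 1
    · rw [if_pos h] at hp
      by_cases he : len + 1 = 1
      · rw [if_pos (by simpa using he)] at hp
        dsimp only at hp
        refine ih (i + 1) _ _ _ _ _ _ (by omega) (by omega) (by omega) ?_ p hp
        intro q hq
        rcases List.mem_append.mp hq with hq | hq
        · exact hsi q hq
        · have hsI : 1 ≤ sI := h0 (by omega)
          have hq' : q = (sI, i + 1) := by simpa using hq
          rw [hq']
          simpa using hsI
      · rw [if_neg (by simpa using he)] at hp
        dsimp only at hp
        exact ih (i + 1) _ _ _ _ _ _ (by omega) (by omega) (by omega) hsi p hp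
    · rw [if_neg h] at hp
      rw [if_pos rfl] at hp
      dsimp only at hp
      refine ih (i + 1) _ _ _ _ _ _ (by omega) (by omega) (by omega) ?_ p hp
      intro q hq
      rcases List.mem_append.mp hq with hq | hq
      · exact hsi q hq
      · have hq' : q = (i, i + 1) := by simpa using hq
        rw [hq']
        simpa using hi

-- with segment_len = 1 the final remaining-frames branch never fires
theorem pvA_finish_one (ur : Bool)
    (t : (List (Int × Int)) × (List (Int × Int)) × Int × Int × Int × Int × Int) :
    pvA_finish 1 ur t = (t.1, t.2.1) := by
  unfold pvA_finish
  rw [if_neg (by rintro ⟨-, h1, h2⟩; omega)]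

theorem pvB_out_mem (seg : Int) (ur : Bool) (runs : List (Int × Int × Int)) :
    ∀ x ∈ (pvB_emit seg runs).2, x ∈ (pvB_out seg ur runs).2 := by
  intro x hx
  unfold pvB_out
  by_cases hc : ur = true ∧ 0 < seg
  · simp only [if_pos hc]
    cases runs.getLast? with
    | none => exact hx
    | some c =>
      obtain ⟨v, s, L⟩ := c
      by_cases hr : PySem.Int.mod L seg > 10
      · simp only [if_pos hr]
        exact List.mem_append.mpr (Or.inl hx)
      · simp only [if_neg hr]; exact hx
  · simp only [if_neg hc]; exact hx

theorem find_continuous_segments_tight : Claim_exact_find_continuous_segments := by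
  unfold Claim_exact_find_continuous_segments
  intro nums seg ur _ hpre hD hEq
  have hseg : seg = 1 := hD
  subst hseg
  have hperm := PySem.List.sorted_perm (xs := nums) (key := id) (rev := false)
  cases hsor : PySem.List.sorted nums id false with
  | nil =>
    rw [hsor] at hperm
    exact hpre (hperm.nil_eq.symm)
  | cons n0 rest =>
    have hA : find_continuous_segments nums 1 ur
        = pvA_finish 1 ur (pvA_loop 1 rest 1 [] [] n0 0 n0 1) := by
      unfold find_continuous_segments; rw [hsor]
    have hB : find_continuous_segments_alt nums 1 ur
        = pvB_out 1 ur (pvB_runs rest 1 (some (n0, 0, 1)) []) := by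
      rw [alt_eq_pvB_out, hsor]
      simp [pvB_runs]
    -- (0, 1) is the first index segment B emits
    obtain ⟨Lf, rs, hruns, hle⟩ := pvB_runs_head rest 1 n0 0 1
    have hmem : ((0 : Int), (1 : Int)) ∈ (pvB_emit 1 (pvB_runs rest 1 (some (n0, 0, 1)) [])).2 := by
      rw [hruns, pvB_emit_cons]
      refine List.mem_append.mpr (Or.inl ?_)
      simp only [pvB_chunks]
      rw [if_pos (by omega : (0:Int) < 1), PySem.Int.floordiv_eq_ediv_of_pos (by omega), Int.ediv_one]
      refine List.mem_map.mpr ⟨0, ?_, by norm_num⟩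
      rw [PySem.List.mem_pyRange_one]
      omega
    have hmemB : ((0 : Int), (1 : Int)) ∈ (find_continuous_segments_alt nums 1 ur).2 := by
      rw [hB]; exact pvB_out_mem 1 ur _ _ hmem
    -- while every index pair A emits starts at ≥ 1
    have hgeA : ∀ p ∈ (find_continuous_segments nums 1 ur).2, 1 ≤ p.1 := by
      rw [hA, pvA_finish_one]
      exact pvA_idx_ge_one rest 1 [] [] n0 0 n0 1 (by omega) (by omega) (by omega) (by simp)
    rw [hEq] at hgeA
    have := hgeA (0, 1) hmemB
    omega
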